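-- pv_equiv track=rewrite | github.com/Aasthaengg/IBMdataset | Python_codes/p04035/s377728197.py | f
-- ===== SOURCE A (Python) =====
-- def f(S, T):
--     N = len(S)
--     F = [[0 for _ in range(N)] for __ in range(N)]
--
--     for i in range(N):
--         for j in range(N):
--             SS = S[i]
--             TT = T[j]
--             if TT == (0, 0):
--                 F[i][j] = 1 if SS == (0, 1) else 0
--             elif TT == (0, 1):
--                 if SS == (1, 0):
--                     return None
--                 F[i][j] = 1
--             elif TT == (1, 0):
--                 if SS == (0, 1):
--                     return None
--                 F[i][j] = 0
--             else:
--                 F[i][j] = 0 if SS == (1, 0) else 1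
--
--     return F
-- ===== SOURCE B (Python) =====
-- def f(S, T):
--     N = len(S)
--     Tp = T[:N]
--
--     # conflict detection via membership flags (no pair enumeration)
--     if (((1, 0) in S and (0, 1) in Tp) or
--             ((0, 1) in S and (1, 0) in Tp)):
--         return None
--
--     # only three distinct rows can occur; build each template once
--     row01 = [0 if t == (1, 0) else 1 for t in Tp]          # row for s == (0, 1)
--     row10 = [1 if t == (0, 1) else 0 for t in Tp]          # row for s == (1, 0)
--     rowo = [0 if t in ((0, 0), (1, 0)) else 1 for t in Tp] # row for any other s
--
--     return [row01 if s == (0, 1) else row10 if s == (1, 0) else rowo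
--             for s in S]
-- ===== Notes on version B (the rewrite author's own statement) =====
-- stated objective: faster
-- what changed: A's per-cell nested loop mutating an NxN matrix is replaced by membership-flag conflict detection ((1,0)/(0,1) in S and in T[:N]) plus three precomputed template rows, one of which is selected for each element of S, so no per-cell rule evaluation remains.
import Mathlib
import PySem

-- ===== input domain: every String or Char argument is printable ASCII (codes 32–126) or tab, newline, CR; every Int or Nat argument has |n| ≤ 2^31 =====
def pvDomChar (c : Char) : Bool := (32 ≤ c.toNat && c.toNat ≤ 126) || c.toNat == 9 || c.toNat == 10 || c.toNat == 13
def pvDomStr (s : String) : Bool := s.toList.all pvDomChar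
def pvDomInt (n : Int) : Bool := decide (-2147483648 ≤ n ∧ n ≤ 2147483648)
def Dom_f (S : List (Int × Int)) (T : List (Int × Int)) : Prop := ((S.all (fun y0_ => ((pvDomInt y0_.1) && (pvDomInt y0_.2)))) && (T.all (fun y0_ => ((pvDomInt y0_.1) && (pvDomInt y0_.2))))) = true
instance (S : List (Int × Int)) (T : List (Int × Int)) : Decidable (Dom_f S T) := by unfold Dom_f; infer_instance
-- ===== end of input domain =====

-- B replaces A's per-cell nested-loop rule by membership-flag conflict detection and
-- three precomputed template rows selected per element (objective: faster construction;
-- the returned rows may be shared list values, equal in value to A's).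

-- ===== PORT A =====
-- F[i][j] = v  (list-of-lists mutation)
def pvSetCell (F : List (List Int)) (i j : Nat) (v : Int) : List (List Int) :=
  F.set i ((F.getD i []).set j v)

-- the body of A's inner loop for one (i, j); none = 'return None'.
-- If S[i] or T[j] is out of range Python raises IndexError (outside Pre_f); we return none there.
def pvStepA (S T : List (Int × Int)) (i j : Nat) (F : List (List Int)) : Option (List (List Int)) :=
  match PySem.List.pyGet? S (Int.ofNat i), PySem.List.pyGet? T (Int.ofNat j) with
  | some SS, some TT =>
    if TT = ((0 : Int), (0 : Int)) then
      some (pvSetCell F i j (if SS = ((0 : Int), (1 : Int)) then 1 else 0))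
    else if TT = ((0 : Int), (1 : Int)) then
      if SS = ((1 : Int), (0 : Int)) then none else some (pvSetCell F i j 1)
    else if TT = ((1 : Int), (0 : Int)) then
      if SS = ((0 : Int), (1 : Int)) then none else some (pvSetCell F i j 0)
    else
      some (pvSetCell F i j (if SS = ((1 : Int), (0 : Int)) then 0 else 1))
  | _, _ => none

def f (S : List (Int × Int)) (T : List (Int × Int)) : Option (List (List Int)) :=
  let N := S.length
  let F0 := (List.range N).map (fun _ => (List.range N).map (fun _ => (0 : Int)))
  (List.range N).foldl
    (fun acc i => (List.range N).foldl (fun acc2 j => acc2.bind (pvStepA S T i j)) acc)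
    (some F0)

-- ===== PORT B =====
-- the three template rows of Source B
def pvRow01 (Tp : List (Int × Int)) : List Int :=
  Tp.map (fun t => if t = ((1 : Int), (0 : Int)) then 0 else 1)
def pvRow10 (Tp : List (Int × Int)) : List Int :=
  Tp.map (fun t => if t = ((0 : Int), (1 : Int)) then 1 else 0)
def pvRowO (Tp : List (Int × Int)) : List Int :=
  Tp.map (fun t => if t = ((0 : Int), (0 : Int)) ∨ t = ((1 : Int), (0 : Int)) then 0 else 1)

def f_alt (S : List (Int × Int)) (T : List (Int × Int)) : Option (List (List Int)) :=
  let Tp := T.take S.length   -- T[:N]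
  if (S.contains ((1 : Int), (0 : Int)) && Tp.contains ((0 : Int), (1 : Int))) ||
     (S.contains ((0 : Int), (1 : Int)) && Tp.contains ((1 : Int), (0 : Int))) then none
  else
    let row01 := pvRow01 Tp
    let row10 := pvRow10 Tp
    let rowo := pvRowO Tp
    some (S.map (fun s =>
      if s = ((0 : Int), (1 : Int)) then row01
      else if s = ((1 : Int), (0 : Int)) then row10
      else rowo))

-- ===== PRECONDITION & SPEC =====
-- forbidden pair predicate (used by Pre_f and the proofs)
def pvForbidden (s t : Int × Int) : Bool :=
  (t = ((0 : Int), (1 : Int)) && s = ((1 : Int), (0 : Int))) ||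
  (t = ((1 : Int), (0 : Int)) && s = ((0 : Int), (1 : Int)))

-- Pre_f is exactly the set of inputs on which Python A returns: when len(T) < len(S),
-- A raises IndexError at row 0 unless a forbidden pair with S[0] occurs inside T first.
def Pre_f (S : List (Int × Int)) (T : List (Int × Int)) : Prop :=
  S.length ≤ T.length ∨ T.any (fun t => pvForbidden S.headI t) = true
instance (S : List (Int × Int)) (T : List (Int × Int)) : Decidable (Pre_f S T) := by
  unfold Pre_f; infer_instance

def pvWitness_f : (List (Int × Int)) × (List (Int × Int)) :=
  ([((0 : Int), (1 : Int))], [((0 : Int), (0 : Int))])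

def Spec_f (S : List (Int × Int)) (T : List (Int × Int)) (out : Option (List (List Int))) : Prop := out = f_alt S T
instance (S : List (Int × Int)) (T : List (Int × Int)) (out : Option (List (List Int))) : Decidable (Spec_f S T out) := by unfold Spec_f; infer_instance

-- ===== CLAIM (what is proved, stated in full; the proofs are below) =====
def Claim_equal_f : Prop := ∀ (S : List (Int × Int)) (T : List (Int × Int)), Dom_f S T → Pre_f S T → Spec_f S T (f S T)

-- ===== LEMMAS AND PROOFS =====

-- A's per-cell value (proof-side characterization of A's if-chain)
def pvCell (s t : Int × Int) : Int :=
  if t = ((0 : Int), (0 : Int)) then (if s = ((0 : Int), (1 : Int)) then 1 else 0)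
  else if t = ((0 : Int), (1 : Int)) then 1
  else if t = ((1 : Int), (0 : Int)) then 0
  else if s = ((1 : Int), (0 : Int)) then 0 else 1

-- Option-state folds with a bind step stay none.
theorem pvBindFold_none {α : Type} (g : Nat → α → Option α) (js : List Nat) :
    js.foldl (fun acc j => acc.bind (g j)) none = none := by
  induction js with
  | nil => rfl
  | cons j js ih => simpa using ih

-- characterization of a bind-fold whose step is 'if p j then none else set'
theorem pvBindFold_eq {α : Type} (g : Nat → α → Option α) (h : Nat → α → α)
    (Inv : α → Prop) (p : Nat → Bool) (js : List Nat)
    (hpres : ∀ j a, Inv a → Inv (h j a))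
    (hg : ∀ j ∈ js, ∀ a, Inv a → g j a = if p j then none else some (h j a))
    (a : α) (ha : Inv a) :
    js.foldl (fun acc j => acc.bind (g j)) (some a) =
      if js.any p then none else some (js.foldl (fun b j => h j b) a) := by
  induction js generalizing a with
  | nil => simp
  | cons j js ih =>
    have hj := hg j (by simp) a ha
    by_cases hp : p j = true
    · simp [hp, hj, pvBindFold_none]
    · simp only [List.foldl_cons, Option.bind_some, hj, hp, List.any_cons,
        Bool.false_or]
      exact ih (fun j' hj' => hg j' (by simp [hj']) ) (h j a) (hpres j a ha)

-- if some step is constantly none, the whole bind-fold is none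
theorem pvBindFold_eventually_none {α : Type} (g : Nat → α → Option α) (js : List Nat)
    (j0 : Nat) (hj0 : j0 ∈ js) (hnone : ∀ a, g j0 a = none) (acc : Option α) :
    js.foldl (fun acc j => acc.bind (g j)) acc = none := by
  induction js generalizing acc with
  | nil => simp at hj0
  | cons j js ih =>
    rcases List.mem_cons.1 hj0 with rfl | hmem
    · have : (acc.bind (g j0)) = none := by cases acc <;> simp [hnone]
      simp only [List.foldl_cons, this]
      exact pvBindFold_none _ _
    · exact ih hmem _

-- iterating pvSetCell on a fixed row i = setting the row once
theorem pvSetCell_fold (i : Nat) (w : Nat → Int) (js : List Nat) (F : List (List Int))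
    (hi : i < F.length) :
    js.foldl (fun G j => pvSetCell G i j (w j)) F =
      F.set i (js.foldl (fun r j => r.set j (w j)) (F.getD i [])) := by
  induction js generalizing F with
  | nil => simp [List.getD, List.getElem?_eq_getElem hi]
  | cons j js ih =>
    have hlen : i < (pvSetCell F i j (w j)).length := by simpa [pvSetCell] using hi
    rw [List.foldl_cons, ih _ hlen]
    simp [pvSetCell, List.set_set, List.getD, hi]

-- setting every index of a row in order = mapping over range
theorem pvRowFold_eq_map {α : Type} (w : Nat → α) (r : List α) (k : Nat) (hk : k ≤ r.length) :
    (List.range k).foldl (fun s j => s.set j (w j)) r =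
      (List.range k).map w ++ r.drop k := by
  induction k with
  | zero => simp
  | succ k ih =>
    rw [List.range_succ, List.foldl_append, List.map_append,
      ih (Nat.le_of_succ_le hk), List.foldl_cons, List.foldl_nil]
    have hkr : k < r.length := hk
    have hset : ((List.range k).map w ++ r.drop k).set k (w k)
        = (List.range k).map w ++ (r.drop k).set 0 (w k) := by
      have h1 : ((List.range k).map w).length = k := by simp
      rw [List.set_append]
      simp [h1]
    have h2 : (r.drop k).set 0 (w k) = w k :: r.drop (k + 1) := by
      rw [List.drop_eq_getElem_cons hkr]; rfl
    rw [hset, h2]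
    simp

-- the if-chain of A's loop body, written through pvForbidden/pvCell
theorem pvStep_chain (SS TT : Int × Int) (F : List (List Int)) (i j : Nat) :
    (if TT = ((0 : Int), (0 : Int)) then
      some (pvSetCell F i j (if SS = ((0 : Int), (1 : Int)) then 1 else 0))
    else if TT = ((0 : Int), (1 : Int)) then
      if SS = ((1 : Int), (0 : Int)) then none else some (pvSetCell F i j 1)
    else if TT = ((1 : Int), (0 : Int)) then
      if SS = ((0 : Int), (1 : Int)) then none else some (pvSetCell F i j 0)
    else
      some (pvSetCell F i j (if SS = ((1 : Int), (0 : Int)) then 0 else 1))) =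
    if pvForbidden SS TT then none else some (pvSetCell F i j (pvCell SS TT)) := by
  simp only [pvForbidden, pvCell]
  split_ifs <;> simp_all

-- A's loop body, in range
theorem pvStepA_eq (S T : List (Int × Int)) (i j : Nat) (F : List (List Int))
    (hi : i < S.length) (hj : j < T.length) :
    pvStepA S T i j F =
      if pvForbidden (S.getD i (0, 0)) (T.getD j (0, 0)) then none
      else some (pvSetCell F i j (pvCell (S.getD i (0, 0)) (T.getD j (0, 0)))) := by
  unfold pvStepA
  have h1 : PySem.List.pyGet? S (Int.ofNat i) = some (S.getD i (0, 0)) := by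
    have := PySem.List.pyGet?_natCast (xs := S) (n := i)
    simp_all [List.getD, Int.ofNat_eq_natCast]
  have h2 : PySem.List.pyGet? T (Int.ofNat j) = some (T.getD j (0, 0)) := by
    have := PySem.List.pyGet?_natCast (xs := T) (n := j)
    simp_all [List.getD, Int.ofNat_eq_natCast]
  rw [h1, h2]
  exact pvStep_chain _ _ _ _ _

-- out-of-range column: A's loop body is none (Python raises there)
theorem pvStepA_none (S T : List (Int × Int)) (i j : Nat) (F : List (List Int))
    (hj : T.length ≤ j) : pvStepA S T i j F = none := by
  unfold pvStepA
  have h2 : PySem.List.pyGet? T (Int.ofNat j) = none := by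
    have := PySem.List.pyGet?_natCast (xs := T) (n := j)
    simp_all [Int.ofNat_eq_natCast]
  rw [h2]
  rcases PySem.List.pyGet? S (Int.ofNat i) with _ | _ <;> rfl

-- a fold whose every step yields none on a nonempty index list is none
theorem pvFoldl_all_none {α : Type} (step : Option α → Nat → Option α) (js : List Nat)
    (hjs : js ≠ []) (h : ∀ acc j, j ∈ js → step acc j = none) (acc : Option α) :
    js.foldl step acc = none := by
  induction js generalizing acc with
  | nil => exact absurd rfl hjs
  | cons j js ih =>
    rcases js with _ | ⟨j', js'⟩
    · simpa using h acc j (by simp)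
    · exact ih (by simp) (fun a j hm => h a j (by simp [List.mem_cons] at hm ⊢; tauto)) _

-- B's branch condition through membership, from the pairwise 'any'
theorem pvAny_eq_flags (S Tp : List (Int × Int)) :
    S.any (fun s => Tp.any (fun t => pvForbidden s t)) =
      ((S.contains ((1 : Int), (0 : Int)) && Tp.contains ((0 : Int), (1 : Int))) ||
       (S.contains ((0 : Int), (1 : Int)) && Tp.contains ((1 : Int), (0 : Int)))) := by
  rw [Bool.eq_iff_iff]
  simp only [List.any_eq_true, Bool.or_eq_true, Bool.and_eq_true,
    List.contains_iff_mem, pvForbidden, decide_eq_true_eq, Bool.or_eq_true,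
    Bool.and_eq_true]
  constructor
  · rintro ⟨s, hs, t, ht, ⟨ht1, hs1⟩ | ⟨ht1, hs1⟩⟩ <;> subst hs1 <;> subst ht1
    · exact Or.inl ⟨hs, ht⟩
    · exact Or.inr ⟨hs, ht⟩
  · rintro (⟨hs, ht⟩ | ⟨hs, ht⟩)
    · exact ⟨_, hs, _, ht, Or.inl ⟨rfl, rfl⟩⟩
    · exact ⟨_, hs, _, ht, Or.inr ⟨rfl, rfl⟩⟩

-- a row of A's matrix equals B's template row for that element
theorem pvCellRow_eq_template (s : Int × Int) (Tp : List (Int × Int)) :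
    Tp.map (fun t => pvCell s t) =
      (if s = ((0 : Int), (1 : Int)) then pvRow01 Tp
       else if s = ((1 : Int), (0 : Int)) then pvRow10 Tp
       else pvRowO Tp) := by
  by_cases h1 : s = ((0 : Int), (1 : Int))
  · subst h1
    simp only [pvRow01]
    apply List.map_congr_left
    intro t _
    simp only [pvCell]
    split_ifs <;> simp_all
  · by_cases h2 : s = ((1 : Int), (0 : Int))
    · subst h2
      rw [if_neg (by decide), if_pos rfl]
      simp only [pvRow10]
      apply List.map_congr_left
      intro t _
      simp only [pvCell]
      split_ifs <;> simp_all
    · rw [if_neg h1, if_neg h2]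
      simp only [pvRowO]
      apply List.map_congr_left
      intro t _
      simp only [pvCell]
      split_ifs <;> simp_all

-- ===== main equivalence =====
theorem f_eq_f_alt (S T : List (Int × Int)) (hpre : Pre_f S T) : f S T = f_alt S T := by
  by_cases hge : S.length ≤ T.length
  · -- all T[j] accesses succeed; both sides reduce to the same any/matrix form
    set N := S.length with hN
    set d : Int × Int := (0, 0) with hd
    set w : Nat → Nat → Int := fun i j => pvCell (S.getD i d) (T.getD j d) with hw
    set pb : Nat → Nat → Bool := fun i j => pvForbidden (S.getD i d) (T.getD j d) with hpb
    set F0 : List (List Int) :=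
      (List.range N).map (fun _ => (List.range N).map (fun _ => (0 : Int))) with hF0
    set Inv : List (List Int) → Prop :=
      fun F => F.length = N ∧ ∀ r ∈ F, r.length = N with hInv
    set rowmap : Nat → List Int := fun i => (List.range N).map (w i) with hrowmap
    -- inner loop
    have inner_eq : ∀ i < N, ∀ F : List (List Int), Inv F →
        (List.range N).foldl (fun acc2 j => acc2.bind (pvStepA S T i j)) (some F) =
          if (List.range N).any (fun j => pb i j) then none
          else some (F.set i (rowmap i)) := by
      intro i hi F hF
      have hstep := pvBindFold_eq (pvStepA S T i)
        (fun j G => pvSetCell G i j (w i j)) (fun _ => True) (pb i) (List.range N)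
        (fun _ _ _ => trivial)
        (fun j hj a _ => by
          have hjN : j < N := List.mem_range.1 hj
          exact pvStepA_eq S T i j a hi (lt_of_lt_of_le hjN hge))
        F trivial
      rw [hstep]
      congr 1
      have hiF : i < F.length := hF.1 ▸ hi
      rw [pvSetCell_fold i (w i) (List.range N) F hiF]
      have hrow : N ≤ (F.getD i []).length := by
        have : F.getD i [] ∈ F := by
          rw [List.getD, List.getElem?_eq_getElem hiF]
          exact List.getElem_mem hiF
        exact le_of_eq (hF.2 _ this).symm
      have hrl : (F.getD i []).length = N := by
        have : F.getD i [] ∈ F := by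
          rw [List.getD, List.getElem?_eq_getElem hiF]
          exact List.getElem_mem hiF
        exact hF.2 _ this
      rw [pvRowFold_eq_map (w i) _ N hrow]
      rw [List.drop_eq_nil_of_le (le_of_eq hrl), List.append_nil]
    -- outer loop
    have outer_eq :
        f S T = if (List.range N).any (fun i => (List.range N).any (fun j => pb i j))
          then none
          else some ((List.range N).foldl (fun F i => F.set i (rowmap i)) F0) := by
      show (List.range N).foldl
          (fun acc i => (List.range N).foldl (fun acc2 j => acc2.bind (pvStepA S T i j)) acc)
          (some F0) = _
      have := pvBindFold_eq
        (fun i F => (List.range N).foldl (fun acc2 j => acc2.bind (pvStepA S T i j)) (some F))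
        (fun i F => F.set i (rowmap i)) Inv
        (fun i => (List.range N).any (fun j => pb i j)) (List.range N)
        (fun i F hF => by
          constructor
          · simpa using hF.1
          · intro r hr
            rcases List.mem_or_eq_of_mem_set hr with hr' | rfl
            · exact hF.2 _ hr'
            · simp [hrowmap])
        (fun i hi F hF => inner_eq i (List.mem_range.1 hi) F hF)
        F0 (by constructor <;> simp [hF0])
      rw [← this]
      apply List.foldl_ext
      intro acc i hi
      cases acc with
      | none => simp [pvBindFold_none]
      | some F => rfl
    have hF0len : F0.length = N := by simp [hF0]
    have hfoldF0 : (List.range N).foldl (fun F i => F.set i (rowmap i)) F0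
        = (List.range N).map rowmap := by
      rw [pvRowFold_eq_map rowmap F0 N (le_of_eq hF0len.symm)]
      simp [hF0len]
    -- compare the two 'any's
    have htk : (T.take N).length = N := by simp; omega
    have hany : (List.range N).any (fun i => (List.range N).any (fun j => pb i j))
        = S.any (fun s => (T.take N).any (fun t => pvForbidden s t)) := by
      rw [Bool.eq_iff_iff]
      simp only [List.any_eq_true, List.mem_range]
      constructor
      · rintro ⟨i, hi, j, hj, hb⟩
        refine ⟨S[i], List.getElem_mem hi, (T.take N)[j]'(by omega), List.getElem_mem (by omega), ?_⟩
        have hjT : j < T.length := by omega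
        have hgi : S.getD i d = S[i] := List.getD_eq_getElem S d hi
        have hgj : T.getD j d = T[j] := List.getD_eq_getElem T d hjT
        simp only [hpb] at hb
        rw [hgi, hgj] at hb
        simpa [List.getElem_take] using hb
      · rintro ⟨s, hs, t, ht, hb⟩
        rcases List.mem_iff_getElem.1 hs with ⟨i, hi, rfl⟩
        rcases List.mem_iff_getElem.1 ht with ⟨j, hj, rfl⟩
        have hjN : j < N := by omega
        have hjT : j < T.length := by omega
        refine ⟨i, hi, j, hjN, ?_⟩
        have hgi : S.getD i d = S[i] := List.getD_eq_getElem S d hi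
        have hgj : T.getD j d = T[j] := List.getD_eq_getElem T d hjT
        simp only [hpb, hgi, hgj]
        simp only [List.getElem_take] at hb
        exact hb
    -- compare the two matrices
    have hmat : (List.range N).map rowmap
        = S.map (fun s => (T.take N).map (fun t => pvCell s t)) := by
      apply List.ext_getElem (by simpa using hN)
      intro i h1 h2
      have hiN : i < N := by simpa using h1
      simp only [List.getElem_map, List.getElem_range]
      apply List.ext_getElem (by simp [hrowmap]; omega)
      intro j g1 g2
      have hjN : j < N := by simpa [hrowmap] using g1
      have hjT : j < T.length := by omega
      have e1 : S[i]? = some (S[i]'hiN) := List.getElem?_eq_getElem hiN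
      have e2 : T[j]? = some (T[j]'hjT) := List.getElem?_eq_getElem hjT
      simp [hrowmap, hw, List.getElem_take, e1, e2]
    have hmat2 : S.map (fun s => (T.take N).map (fun t => pvCell s t))
        = S.map (fun s =>
            if s = ((0 : Int), (1 : Int)) then pvRow01 (T.take N)
            else if s = ((1 : Int), (0 : Int)) then pvRow10 (T.take N)
            else pvRowO (T.take N)) := by
      apply List.map_congr_left
      intro s _
      exact pvCellRow_eq_template s (T.take N)
    rw [outer_eq, hfoldF0, hany, hmat, hmat2]
    show _ = f_alt S T
    unfold f_alt
    rw [pvAny_eq_flags]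
  · -- len(T) < len(S): A returns None at row 0 (Pre_f guarantees a forbidden pair there)
    have hlt : T.length < S.length := by omega
    have hfa : f S T = none := by
      show (List.range S.length).foldl _ _ = none
      refine pvFoldl_all_none _ (List.range S.length) ?_ ?_ _
      · intro hnil
        have h0 : S.length = 0 := by simpa using congrArg List.length hnil
        omega
      · intro acc i _
        refine pvBindFold_eventually_none _ (List.range S.length) T.length ?_ ?_ _
        · simp [hlt]
        · intro a
          exact pvStepA_none S T i T.length a le_rfl
    have hSne : S ≠ [] := by intro h; rw [h] at hlt; simp at hlt
    rcases hpre with h | h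
    · omega
    · have htake : T.take S.length = T := List.take_of_length_le (le_of_lt hlt)
      have hany : S.any (fun s => (T.take S.length).any (fun t => pvForbidden s t)) = true := by
        rw [htake]
        exact List.any_eq_true.2 ⟨S.headI, by
          cases S with
          | nil => exact absurd rfl hSne
          | cons a l => simp [List.headI], h⟩
      have hflags := (pvAny_eq_flags S (T.take S.length)).symm.trans hany
      rw [hfa]
      unfold f_alt
      simp only [hflags, if_true]

-- ===== VERDICT (by name: the statement is the Claim_ definition above) =====
theorem f_spec : Claim_equal_f := by
  intro S T _ hpre
  unfold Spec_f
  exact f_eq_f_alt S T hpre
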